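-- pv_equiv track=rewrite | github.com/bakhtiarsulaiman/30-useful-functions-in-Python | python_lib.py | pancake_scramble
-- ===== SOURCE A (Python) =====
-- def pancake_scramble(text):
-- 	words = list(text)
-- 	cnt = len(words)
-- 	j = 1
-- 	i = 1
-- 	while j < cnt :
-- 		newword = ''
-- 		z = j
-- 		k = j+1
-- 		for z in reversed(range(k)) :
-- 			newword += words[z]
-- 		for q in range(cnt):
-- 			if q<k :
-- 				continue
-- 			newword += words[q]
-- 		j +=1
-- 		words = list(newword)
-- 	return newword
-- ===== SOURCE B (Python) =====
-- def pancake_scramble(text):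
--     n = len(text)
--     desc, asc = [], []
--     for i, ch in enumerate(text):
--         if i % 2 == (n - 1) % 2:
--             desc.append(ch)
--         else:
--             asc.append(ch)
--     return ''.join(reversed(desc)) + ''.join(asc)
-- ===== Notes on version B (the rewrite author's own statement) =====
-- stated objective: faster
-- what changed: Replaced the loop of n prefix reversals (each rebuilding the whole string) by a single pass that routes each character by index parity into a descending and an ascending part (the closed-form permutation of the pancake scramble).
import Mathlib
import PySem

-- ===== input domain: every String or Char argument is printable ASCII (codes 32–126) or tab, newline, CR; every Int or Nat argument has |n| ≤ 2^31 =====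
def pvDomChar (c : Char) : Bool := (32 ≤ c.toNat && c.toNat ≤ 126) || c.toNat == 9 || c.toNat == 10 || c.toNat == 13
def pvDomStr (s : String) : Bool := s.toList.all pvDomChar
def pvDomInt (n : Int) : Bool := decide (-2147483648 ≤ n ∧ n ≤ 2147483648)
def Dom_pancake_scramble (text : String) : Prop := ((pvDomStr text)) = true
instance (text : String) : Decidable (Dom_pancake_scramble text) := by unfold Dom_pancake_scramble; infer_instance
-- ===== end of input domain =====

-- B replaces A's n rebuild-the-string prefix reversals by one parity-routing pass (objective: faster).

-- ===== PORT A =====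
-- one iteration of A's while body: newword = reversed prefix of length j+1, then the suffix
def pancakeStep (words : List Char) (cnt j : Nat) : List Char :=
  let k : Nat := j + 1
  let nw := ((PySem.List.pyRange 0 (k : Int) 1).reverse).foldl
      (fun acc z => acc ++ [PySem.List.pyGetD words z ' ']) []
  (PySem.List.pyRange 0 (cnt : Int) 1).foldl
      (fun acc q => if q < (k : Int) then acc else acc ++ [PySem.List.pyGetD words q ' ']) nw

-- A's while loop: words = list(newword) after each iteration, newword returned at the end
def pancakeWhile (words : List Char) (cnt j : Nat) (newword : List Char) : List Char :=
  if j < cnt then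
    pancakeWhile (pancakeStep words cnt j) cnt (j + 1) (pancakeStep words cnt j)
  else newword
termination_by cnt - j

def pancake_scramble (text : String) : String :=
  let words := text.toList
  let cnt := words.length
  String.mk (pancakeWhile words cnt 1 [])

-- ===== PORT B =====
def pancake_scramble_alt (text : String) : String :=
  let n : Int := text.toList.length
  let p := (PySem.List.enumerate text.toList 0).foldl
      (fun (acc : List Char × List Char) ic =>
        if PySem.Int.mod ic.1 2 = PySem.Int.mod (n - 1) 2 then (acc.1 ++ [ic.2], acc.2)
        else (acc.1, acc.2 ++ [ic.2]))
      ([], [])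
  String.mk (p.1.reverse ++ p.2)

-- ===== PRECONDITION & SPEC =====
-- A raises UnboundLocalError on strings of length ≤ 1 (the while body never runs, 'newword' stays unbound)
def Pre_pancake_scramble (text : String) : Prop := 2 ≤ text.toList.length
instance (text : String) : Decidable (Pre_pancake_scramble text) := by unfold Pre_pancake_scramble; infer_instance
def pvWitness_pancake_scramble : String := "abcd"

def Spec_pancake_scramble (text : String) (out : String) : Prop := out = pancake_scramble_alt text
instance (text : String) (out : String) : Decidable (Spec_pancake_scramble text out) := by unfold Spec_pancake_scramble; infer_instance

-- ===== CLAIM (what is proved, stated in full; the proofs are below) =====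
def Claim_equal_pancake_scramble : Prop := ∀ (text : String), Dom_pancake_scramble text → Pre_pancake_scramble text → Spec_pancake_scramble text (pancake_scramble text)
-- ===== LEMMAS AND PROOFS =====

-- flip k l: reverse the prefix of length k
def pvFlip (k : Nat) (l : List Char) : List Char := (l.take k).reverse ++ l.drop k

-- the mathematical content of A's loop
def pvFlips (w : List Char) (cnt j : Nat) : List Char :=
  if j < cnt then pvFlips (pvFlip (j + 1) w) cnt (j + 1) else w
termination_by cnt - j

-- keep the head iff b, flipping b at each step: the elements at even (b = true) / odd (b = false) positions
def pvSel (b : Bool) : List Char → List Char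
  | [] => []
  | c :: t => (if b then [c] else []) ++ pvSel (!b) t

-- closed form of the scramble
def pvC (l : List Char) : List Char :=
  (pvSel (decide ((l.length - 1) % 2 = 0)) l).reverse ++ pvSel (!decide ((l.length - 1) % 2 = 0)) l

lemma pvFlip_length (k : Nat) (l : List Char) : (pvFlip k l).length = l.length := by
  simp [pvFlip]; omega

lemma pvFoldl_skip {k : Int} (f : List Char → Int → List Char) (L : List Char) :
    ∀ (R : List Int), (∀ q ∈ R, q < k) →
      R.foldl (fun acc q => if q < k then acc else f acc q) L = L := by
  intro R
  induction R generalizing L with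
  | nil => intro _; rfl
  | cons r t ih =>
    intro hmem
    simp only [List.foldl_cons, if_pos (hmem r (by simp))]
    exact ih L (fun q hq => hmem q (by simp [hq]))

lemma pvFoldl_noskip {k : Int} (g : Int → Char) (L : List Char) :
    ∀ (R : List Int), (∀ q ∈ R, ¬ q < k) →
      R.foldl (fun acc q => if q < k then acc else acc ++ [g q]) L = L ++ R.map g := by
  intro R
  induction R generalizing L with
  | nil => intro _; simp
  | cons r t ih =>
    intro hmem
    simp only [List.foldl_cons, if_neg (hmem r (by simp)), List.map_cons]
    rw [ih (L ++ [g r]) (fun q hq => hmem q (by simp [hq]))]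
    simp

lemma pvMap_range_take (words : List Char) (k : Nat) (h : k ≤ words.length) :
    (PySem.List.pyRange 0 (k : Int) 1).map (fun z => PySem.List.pyGetD words z ' ') =
      words.take k := by
  have hall := PySem.List.map_pyGetD_pyRange_zero' words ' '
  rw [PySem.List.pyRange_one_append 0 (k : Int) (words.length : Int)
      (by positivity) (by exact_mod_cast h), List.map_append,
    PySem.List.map_pyGetD_pyRange' words ' ' (a := (k : Int)) (by positivity)] at hall
  simp only [Int.toNat_natCast] at hall
  have hsp : words.take k ++ words.drop k =
      (PySem.List.pyRange 0 (k : Int) 1).map (fun z => PySem.List.pyGetD words z ' ')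
        ++ words.drop k := by
    rw [List.take_append_drop]; exact hall.symm
  exact (List.append_cancel_right hsp).symm

lemma pancakeStep_eq (words : List Char) (j : Nat) (h : j + 1 ≤ words.length) :
    pancakeStep words words.length j = pvFlip (j + 1) words := by
  show (PySem.List.pyRange 0 (words.length : Int) 1).foldl
      (fun acc q => if q < ((j + 1 : Nat) : Int) then acc
        else acc ++ [PySem.List.pyGetD words q ' '])
      (((PySem.List.pyRange 0 ((j + 1 : Nat) : Int) 1).reverse).foldl
        (fun acc z => acc ++ [PySem.List.pyGetD words z ' ']) [])
      = pvFlip (j + 1) words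
  unfold pvFlip
  rw [PySem.List.foldl_append_singleton_eq_map, List.map_reverse,
    pvMap_range_take words (j + 1) h, List.nil_append]
  rw [PySem.List.pyRange_one_append 0 ((j + 1 : Nat) : Int) (words.length : Int)
    (by positivity) (by exact_mod_cast h), List.foldl_append]
  rw [pvFoldl_skip _ _ _ (fun q hq => ((PySem.List.mem_pyRange_one).1 hq).2)]
  rw [pvFoldl_noskip _ _ _ (fun q hq hlt => by
    have := ((PySem.List.mem_pyRange_one).1 hq).1; omega)]
  congr 1
  have := PySem.List.map_pyGetD_pyRange' words ' ' (a := ((j + 1 : Nat) : Int)) (by positivity)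
  simpa using this

lemma pancakeWhile_eq_flips_aux : ∀ (n : Nat) (w : List Char) (cnt j : Nat) (x : List Char),
    cnt - j = n + 1 → j < cnt → w.length = cnt →
    pancakeWhile w cnt j x = pvFlips w cnt j := by
  intro n
  induction n with
  | zero =>
    intro w cnt j x hn hj hw
    rw [pancakeWhile, if_pos hj, pancakeWhile, if_neg (by omega),
      show pancakeStep w cnt j = _ from hw ▸ pancakeStep_eq w j (by omega), pvFlips, if_pos hj, pvFlips, if_neg (by omega)]
  | succ m ih =>
    intro w cnt j x hn hj hw
    rw [pancakeWhile, if_pos hj, show pancakeStep w cnt j = _ from hw ▸ pancakeStep_eq w j (by omega),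
      ih _ _ _ _ (by omega) (by omega) (by rw [pvFlip_length]; omega)]
    exact (by rw [pvFlips, if_pos hj] :
      pvFlips w cnt j = pvFlips (pvFlip (j + 1) w) cnt (j + 1)).symm

lemma pancakeWhile_eq_flips (w : List Char) (cnt j : Nat) (x : List Char) (hj : j < cnt)
    (hw : w.length = cnt) :
    pancakeWhile w cnt j x = pvFlips w cnt j :=
  pancakeWhile_eq_flips_aux (cnt - j - 1) w cnt j x (by omega) hj hw

lemma pvFlip_append (k : Nat) (a b : List Char) (h : k ≤ a.length) :
    pvFlip k (a ++ b) = pvFlip k a ++ b := by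
  simp [pvFlip, List.take_append_of_le_length h, List.drop_append_of_le_length h]

lemma pvFlips_last_aux : ∀ (n : Nat) (w : List Char) (cnt j : Nat), cnt - j = n + 1 → j < cnt →
    pvFlips w cnt j = pvFlip cnt (pvFlips w (cnt - 1) j) := by
  intro n
  induction n with
  | zero =>
    intro w cnt j hn hj
    have hje : j + 1 = cnt := by omega
    rw [pvFlips, if_pos hj, pvFlips, if_neg (by omega), pvFlips, if_neg (by omega), hje]
  | succ m ih =>
    intro w cnt j hn hj
    rw [pvFlips, if_pos hj, ih _ _ _ (by omega) (by omega)]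
    congr 1
    rw [show pvFlips w (cnt - 1) j = pvFlips (pvFlip (j + 1) w) (cnt - 1) (j + 1) from by
      rw [pvFlips, if_pos (by omega)]]

lemma pvFlips_last (w : List Char) (cnt j : Nat) (hj : j < cnt) :
    pvFlips w cnt j = pvFlip cnt (pvFlips w (cnt - 1) j) :=
  pvFlips_last_aux (cnt - j - 1) w cnt j (by omega) hj

lemma pvFlips_append_aux : ∀ (n : Nat) (a b : List Char) (cnt j : Nat), cnt - j ≤ n → cnt ≤ a.length →
    pvFlips (a ++ b) cnt j = pvFlips a cnt j ++ b := by
  intro n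
  induction n with
  | zero =>
    intro a b cnt j hn h
    rw [pvFlips, if_neg (by omega), pvFlips, if_neg (by omega)]
  | succ m ih =>
    intro a b cnt j hn h
    by_cases hj : j < cnt
    · rw [pvFlips, if_pos hj, pvFlip_append _ _ _ (by omega),
        ih (pvFlip (j + 1) a) b cnt (j + 1) (by omega) (by rw [pvFlip_length]; omega),
        show pvFlips a cnt j = pvFlips (pvFlip (j + 1) a) cnt (j + 1) from by
          rw [pvFlips, if_pos hj]]
    · rw [pvFlips, if_neg hj, pvFlips, if_neg hj]

lemma pvFlips_append (a b : List Char) (cnt j : Nat) (h : cnt ≤ a.length) :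
    pvFlips (a ++ b) cnt j = pvFlips a cnt j ++ b :=
  pvFlips_append_aux (cnt - j) a b cnt j le_rfl h

lemma pvSel_append_singleton (b : Bool) (l : List Char) (x : Char) :
    pvSel b (l ++ [x]) = pvSel b l ++ (if b = decide (l.length % 2 = 0) then [x] else []) := by
  induction l generalizing b with
  | nil => cases b <;> simp [pvSel]
  | cons c t ih =>
    simp only [List.cons_append, pvSel, ih (!b), List.length_cons, List.append_assoc]
    congr 2
    by_cases h : t.length % 2 = 0
    · have h2 : (t.length + 1) % 2 = 1 := by omega
      cases b <;> simp [h, h2]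
    · have h1 : t.length % 2 = 1 := by omega
      have h2 : (t.length + 1) % 2 = 0 := by omega
      cases b <;> simp [h1, h2]

lemma pvSel_length (b : Bool) (l : List Char) :
    (pvSel b l).length + (pvSel (!b) l).length = l.length := by
  induction l generalizing b with
  | nil => simp [pvSel]
  | cons c t ih =>
    have h1 := ih true
    have h2 := ih false
    simp only [Bool.not_true, Bool.not_false] at h1 h2
    cases b <;> simp [pvSel] <;> omega

lemma pvC_length (l : List Char) : (pvC l).length = l.length := by
  unfold pvC
  rw [List.length_append, List.length_reverse]
  exact pvSel_length _ _

lemma pvFlip_full (n : Nat) (z : List Char) (h : z.length ≤ n) : pvFlip n z = z.reverse := by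
  simp [pvFlip, List.take_of_length_le h, List.drop_of_length_le h]

lemma pvC_recur (l : List Char) (x : Char) (h : 1 ≤ l.length) :
    pvC (l ++ [x]) = x :: (pvC l).reverse := by
  unfold pvC
  simp only [List.length_append, List.length_cons, List.length_nil, Nat.zero_add,
    Nat.add_sub_cancel]
  have hb : decide ((l.length - 1) % 2 = 0) = !decide (l.length % 2 = 0) := by
    by_cases h0 : l.length % 2 = 0
    · have h1 : (l.length - 1) % 2 = 1 := by omega
      simp [h0, h1]
    · have h1 : (l.length - 1) % 2 = 0 := by omega
      simp [h0, h1]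
  rw [hb, pvSel_append_singleton, pvSel_append_singleton]
  by_cases h0 : l.length % 2 = 0
  · simp [h0, List.reverse_append]
  · simp [h0, List.reverse_append]

lemma pvFlips_eq_C (l : List Char) : pvFlips l l.length 1 = pvC l := by
  induction l using List.reverseRecOn with
  | nil => rw [pvFlips, if_neg (by simp)]; simp [pvC, pvSel]
  | append_singleton l' x ih =>
    rcases l' with _ | ⟨c, t⟩
    · rw [pvFlips, if_neg (by simp)]; simp [pvC, pvSel]
    · have hm : 1 ≤ (c :: t).length := by simp
      have hlt : 1 < ((c :: t) ++ [x]).length := by simp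
      rw [pvFlips_last _ _ _ hlt]
      have hd : ((c :: t) ++ [x]).length - 1 = (c :: t).length := by simp
      rw [hd, pvFlips_append (c :: t) [x] (c :: t).length 1 le_rfl, ih]
      have hlc : (pvC (c :: t) ++ [x]).length ≤ ((c :: t) ++ [x]).length := by
        simp [pvC_length]
      rw [pvFlip_full _ _ hlc, List.reverse_append, pvC_recur _ _ hm]
      simp

lemma pvMod_flip (c s : Int) (hc : c = 0 ∨ c = 1) :
    decide (PySem.Int.mod (s + 1) 2 = c) = !decide (PySem.Int.mod s 2 = c) := by
  simp only [PySem.Int.mod, Int.fmod_eq_emod]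
  by_cases h : s % 2 = c
  · have h2 : ¬ ((s + 1) % 2 = c) := by omega
    simp [h, h2]
  · have h2 : (s + 1) % 2 = c := by omega
    simp [h, h2]

lemma pvFold_enum (c : Int) (hc : c = 0 ∨ c = 1) :
    ∀ (l : List Char) (s : Int) (a b : List Char),
      (PySem.List.enumerate l s).foldl
        (fun (acc : List Char × List Char) ic =>
          if PySem.Int.mod ic.1 2 = c then (acc.1 ++ [ic.2], acc.2)
          else (acc.1, acc.2 ++ [ic.2]))
        (a, b)
      = (a ++ pvSel (decide (PySem.Int.mod s 2 = c)) l,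
         b ++ pvSel (!decide (PySem.Int.mod s 2 = c)) l) := by
  intro l
  induction l with
  | nil => intro s a b; simp [PySem.List.enumerate_nil, pvSel]
  | cons y t ih =>
    intro s a b
    rw [PySem.List.enumerate_cons]
    simp only [List.foldl_cons]
    by_cases hs : PySem.Int.mod s 2 = c
    · have hs' : s % 2 = c := by simpa [PySem.Int.mod, Int.fmod_eq_emod] using hs
      rw [if_pos hs, ih (s + 1) (a ++ [y]) b, pvMod_flip c s hc]
      simp [pvSel, hs', List.append_assoc]
    · have hs' : ¬ s % 2 = c := by simpa [PySem.Int.mod, Int.fmod_eq_emod] using hs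
      rw [if_neg hs, ih (s + 1) a (b ++ [y]), pvMod_flip c s hc]
      simp [pvSel, hs', List.append_assoc]

lemma alt_eq_C (text : String) : pancake_scramble_alt text = String.mk (pvC text.toList) := by
  unfold pancake_scramble_alt
  rcases hl : text.toList with _ | ⟨c0, t0⟩
  · simp [PySem.List.enumerate_nil, pvC, pvSel]
  · have hc : PySem.Int.mod ((((c0 :: t0) : List Char).length : Int) - 1) 2 = 0 ∨
        PySem.Int.mod ((((c0 :: t0) : List Char).length : Int) - 1) 2 = 1 := by
      simp only [PySem.Int.mod, Int.fmod_eq_emod]; omega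
    show String.mk
        (((PySem.List.enumerate (c0 :: t0) 0).foldl
          (fun (acc : List Char × List Char) ic =>
            if PySem.Int.mod ic.1 2 =
                PySem.Int.mod ((((c0 :: t0) : List Char).length : Int) - 1) 2 then
              (acc.1 ++ [ic.2], acc.2)
            else (acc.1, acc.2 ++ [ic.2]))
          ([], [])).1.reverse ++
         ((PySem.List.enumerate (c0 :: t0) 0).foldl
          (fun (acc : List Char × List Char) ic =>
            if PySem.Int.mod ic.1 2 =
                PySem.Int.mod ((((c0 :: t0) : List Char).length : Int) - 1) 2 then
              (acc.1 ++ [ic.2], acc.2)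
            else (acc.1, acc.2 ++ [ic.2]))
          ([], [])).2)
      = String.mk (pvC (c0 :: t0))
    rw [pvFold_enum _ hc (c0 :: t0) 0 [] []]
    have hiff : (PySem.Int.mod (0 : Int) 2 =
        PySem.Int.mod ((((c0 :: t0) : List Char).length : Int) - 1) 2) ↔
        ((((c0 :: t0) : List Char).length - 1) % 2 = 0) := by
      simp only [PySem.Int.mod, Int.fmod_eq_emod, List.length_cons]
      omega
    rw [decide_eq_decide.mpr hiff]
    · simp [pvC]
    · infer_instance

-- ===== VERDICT (by name: the statement is the Claim_ definition above) =====
theorem pancake_scramble_spec : Claim_equal_pancake_scramble := by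
  intro text _ hpre
  unfold Spec_pancake_scramble pancake_scramble
  rw [alt_eq_C]
  have h2 : 2 ≤ text.toList.length := hpre
  show String.mk (pancakeWhile text.toList text.toList.length 1 []) = _
  rw [pancakeWhile_eq_flips _ _ _ _ (by omega) rfl, pvFlips_eq_C]
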